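-- pv_equiv track=rewrite | github.com/luizgcorreia/afp-crawler | merge_afp_topics_into_metadata.py | deduplicate_topics
-- ===== SOURCE A (Python) =====
-- TOPIC_COLUMNS = ("topic1", "topic2", "topic3")
--
-- def topic_depth(row: dict[str, str]) -> int:
--     return sum(1 for column in TOPIC_COLUMNS if row.get(column, "").strip())
--
-- def deduplicate_topics(rows: list[dict[str, str]]) -> dict[str, dict[str, str]]:
--     best_by_id: dict[str, dict[str, str]] = {}
--     for row in rows:
--         entry_id = row["id"]
--         current_best = best_by_id.get(entry_id)
--         if current_best is None or topic_depth(row) >= topic_depth(current_best):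
--             best_by_id[entry_id] = row
--     return best_by_id
-- ===== SOURCE B (Python) =====
-- TOPIC_COLUMNS = ("topic1", "topic2", "topic3")
--
-- def topic_depth(row):
--     return sum(1 for column in TOPIC_COLUMNS if row.get(column, "").strip())
--
-- def deduplicate_topics(rows):
--     groups = {}
--     for row in rows:
--         groups.setdefault(row["id"], []).append(row)
--     result = {}
--     for entry_id, group in groups.items():
--         result[entry_id] = max(reversed(group), key=topic_depth)
--     return result
-- ===== Notes on version B (the rewrite author's own statement) =====
-- stated objective: alternative
-- what changed: Replaces the streaming running-best scan (compare each row against the current best per id) with a two-pass group-then-select: first group all rows by id, then for each id pick the last row of maximum topic depth via max over the reversed group.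
import Mathlib
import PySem

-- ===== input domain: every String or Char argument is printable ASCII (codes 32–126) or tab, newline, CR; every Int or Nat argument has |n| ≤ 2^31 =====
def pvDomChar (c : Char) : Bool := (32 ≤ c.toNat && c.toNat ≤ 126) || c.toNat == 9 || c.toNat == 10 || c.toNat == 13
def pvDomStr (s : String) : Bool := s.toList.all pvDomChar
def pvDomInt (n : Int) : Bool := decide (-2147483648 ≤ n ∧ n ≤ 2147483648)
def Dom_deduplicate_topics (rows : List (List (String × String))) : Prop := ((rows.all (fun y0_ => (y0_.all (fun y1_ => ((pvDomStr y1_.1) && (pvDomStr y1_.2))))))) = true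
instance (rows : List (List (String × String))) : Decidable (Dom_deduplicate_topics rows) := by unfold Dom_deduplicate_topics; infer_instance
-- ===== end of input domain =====

-- B replaces A's streaming running-best scan by a two-pass group-then-select (group rows by id,
-- then pick the last maximal-depth row of each group); same cost, different decomposition.

-- ===== PORT A =====
def pvTopicColumns : List String := ["topic1", "topic2", "topic3"]

-- shared helper: topic_depth(row) (identical in Source A and Source B)
def topicDepth (row : List (String × String)) : Int :=
  pvTopicColumns.foldl
    (fun acc c => if PySem.Str.strip ((PySem.Dict.mk row).getD c "") ≠ "" then acc + 1 else acc) 0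

-- loop body of A: one row against the running best-by-id dict
def pvStepA (best : PySem.Dict String (List (String × String))) (row : List (String × String)) :
    PySem.Dict String (List (String × String)) :=
  match PySem.Dict.get? (PySem.Dict.mk row) "id" with
  | none => best  -- KeyError in Python: excluded by Pre_
  | some eid =>
      match best.get? eid with
      | none => best.insert eid row
      | some cur => if topicDepth cur ≤ topicDepth row then best.insert eid row else best

def deduplicate_topics (rows : List (List (String × String))) : List (String × List (String × String)) :=
  (rows.foldl pvStepA PySem.Dict.empty).items

-- ===== PORT B =====
-- first pass of B: group rows by id (groups.setdefault(row["id"], []).append(row))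
def pvStepB (gs : PySem.Dict String (List (List (String × String)))) (row : List (String × String)) :
    PySem.Dict String (List (List (String × String))) :=
  match PySem.Dict.get? (PySem.Dict.mk row) "id" with
  | none => gs  -- KeyError in Python: excluded by Pre_
  | some eid => gs.modify eid [] (· ++ [row])

-- second pass of B: max(reversed(group), key=topic_depth); group is never empty in B
def pvSelect (g : List (List (String × String))) : List (String × String) :=
  (PySem.List.max? g.reverse topicDepth).getD []

def deduplicate_topics_alt (rows : List (List (String × String))) : List (String × List (String × String)) :=
  let groups := rows.foldl pvStepB PySem.Dict.empty
  (groups.items.foldl (fun res p => res.insert p.1 (pvSelect p.2)) PySem.Dict.empty).items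

-- ===== PRECONDITION & SPEC =====
-- Pre_ excludes exactly the inputs where Python A raises KeyError: a row without an "id" key.
def Pre_deduplicate_topics (rows : List (List (String × String))) : Prop :=
  (rows.all (fun row => (PySem.Dict.mk row).contains "id")) = true
instance (rows : List (List (String × String))) : Decidable (Pre_deduplicate_topics rows) := by
  unfold Pre_deduplicate_topics; infer_instance

def pvWitness_deduplicate_topics : (List (List (String × String))) :=
  [[("id", "a"), ("topic1", "x")], [("id", "a"), ("topic1", " "), ("topic2", "y")], [("id", "b")]]

def Spec_deduplicate_topics (rows : List (List (String × String))) (out : List (String × List (String × String))) : Prop := out = deduplicate_topics_alt rows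
instance (rows : List (List (String × String))) (out : List (String × List (String × String))) : Decidable (Spec_deduplicate_topics rows out) := by unfold Spec_deduplicate_topics; infer_instance

-- ===== CLAIM (what is proved, stated in full; the proofs are below) =====
def Claim_equal_deduplicate_topics : Prop := ∀ (rows : List (List (String × String))), Dom_deduplicate_topics rows → Pre_deduplicate_topics rows → Spec_deduplicate_topics rows (deduplicate_topics rows)

-- ===== LEMMAS AND PROOFS =====

-- value-mapped view of the grouping dict: each group replaced by its selected row
def pvMapSel (g : PySem.Dict String (List (List (String × String)))) :
    PySem.Dict String (List (String × String)) :=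
  PySem.Dict.mk (g.items.map (fun p => (p.1, pvSelect p.2)))

theorem pvGet?_mapSel (g : PySem.Dict String (List (List (String × String)))) (k : String) :
    (pvMapSel g).get? k = (g.get? k).map pvSelect := by
  simp [pvMapSel, PySem.Dict.get?, List.find?_map, Function.comp_def, Option.map_map]

theorem pvContains_mapSel (g : PySem.Dict String (List (List (String × String)))) (k : String) :
    (pvMapSel g).contains k = g.contains k := by
  simp [pvMapSel, PySem.Dict.contains, List.any_map, Function.comp_def]

theorem pvKeys_mapSel (g : PySem.Dict String (List (List (String × String)))) :
    (pvMapSel g).keys = g.keys := by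
  simp [pvMapSel, PySem.Dict.keys, List.map_map, Function.comp_def]

theorem pvInsert_mapSel (g : PySem.Dict String (List (List (String × String)))) (k : String)
    (v : List (List (String × String))) :
    pvMapSel (g.insert k v) = (pvMapSel g).insert k (pvSelect v) := by
  unfold PySem.Dict.insert
  rw [pvContains_mapSel]
  by_cases h : g.contains k = true
  · simp only [h, if_pos]
    unfold pvMapSel
    simp only [List.map_map]
    congr 1
    apply List.map_congr_left
    intro p _
    by_cases hp : p.1 = k <;> simp [hp]
  · simp only [h]
    unfold pvMapSel
    simp

-- insert of the value already first-found at k, under unique keys, is a no-op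
theorem pvFind_replace_self {α : Type} (l : List (String × α)) (k : String) (v : α)
    (hnd : (l.map Prod.fst).Nodup)
    (hf : (l.find? (fun p => p.1 == k)).map Prod.snd = some v) :
    l.map (fun p => if p.1 == k then (k, v) else p) = l := by
  induction l with
  | nil => simp at hf
  | cons p t ih =>
    simp only [List.map_cons, List.find?_cons] at *
    by_cases hp : (p.1 == k) = true
    · have hk : p.1 = k := by simpa using hp
      simp only [hp, if_pos] at hf ⊢
      simp only [Option.map_some, Option.some.injEq] at hf
      have ht : ∀ q ∈ t, ¬ (q.1 == k) = true := by
        intro q hq hqk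
        have : q.1 = k := by simpa using hqk
        exact (List.nodup_cons.mp hnd).1 (by rw [hk]; exact this ▸ List.mem_map_of_mem hq)
      have hpv : ((k, v) : String × α) = p := by rw [← hk, ← hf]
      have hmap : List.map (fun p => if (p.1 == k) = true then (k, v) else p) t = t := by
        calc List.map (fun p => if (p.1 == k) = true then (k, v) else p) t
            = List.map id t := List.map_congr_left (by intro q hq; simp [ht q hq])
          _ = t := List.map_id t
      rw [hmap, hpv]
    · simp only [hp, if_false, Bool.false_eq_true] at hf ⊢
      rw [ih (List.nodup_cons.mp hnd).2 hf]

theorem pvInsert_self (d : PySem.Dict String (List (String × String))) (k : String)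
    (v : List (String × String)) (hnd : d.keys.Nodup) (h : d.get? k = some v) :
    d.insert k v = d := by
  have hc : d.contains k = true := by
    unfold PySem.Dict.contains
    unfold PySem.Dict.get? at h
    rcases Option.map_eq_some_iff.mp h with ⟨p, hp, _⟩
    exact List.any_eq_true.mpr ⟨p, List.mem_of_find?_eq_some hp, by
      have := List.find?_some hp; simpa using this⟩
  unfold PySem.Dict.insert
  rw [hc, if_pos rfl]
  apply PySem.Dict.ext  -- d = mk (items…) via items equality
  show List.map _ d.items = d.items
  apply pvFind_replace_self d.items k v hnd
  unfold PySem.Dict.get? at h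
  exact h

-- Python max with key, started from some m: the running-max loop
theorem pvFoldlSome (l : List (List (String × String))) (m : List (String × String)) :
    l.foldl
      (fun acc x => match acc with
        | none => some x
        | some m => if topicDepth m < topicDepth x then some x else some m)
      (some m)
    = some (l.foldl (fun mm x => if topicDepth mm < topicDepth x then x else mm) m) := by
  induction l generalizing m with
  | nil => rfl
  | cons x t ih =>
      simp only [List.foldl_cons]
      by_cases h : topicDepth m < topicDepth x <;> simp [h, ih]

theorem pvMax?_cons (x : List (String × String)) (t : List (List (String × String))) :
    PySem.List.max? (x :: t) topicDepth
      = some (t.foldl (fun mm y => if topicDepth mm < topicDepth y then y else mm) x) := by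
  unfold PySem.List.max?
  simp only [List.foldl_cons]
  convert pvFoldlSome t x using 2
  funext acc z
  cases acc <;> rfl

theorem pvFoldl_char (l : List (List (String × String))) (m : List (String × String)) :
    l.foldl (fun mm x => if topicDepth mm < topicDepth x then x else mm) m
      = match PySem.List.max? l topicDepth with
        | none => m
        | some mx => if topicDepth m < topicDepth mx then mx else m := by
  induction l generalizing m with
  | nil => simp [PySem.List.max?]
  | cons x t ih =>
      rw [pvMax?_cons]
      simp only [List.foldl_cons]
      rw [ih, ih x]
      cases hmax : PySem.List.max? t topicDepth with
      | none => simp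
      | some mt =>
          by_cases h1 : topicDepth m < topicDepth x <;>
            by_cases h2 : topicDepth x < topicDepth mt <;>
              simp only [h1, h2, if_true, if_false] <;> split_ifs <;> first | rfl | omega

theorem pvTd_nonneg (row : List (String × String)) : 0 ≤ topicDepth row := by
  unfold topicDepth pvTopicColumns
  simp only [List.foldl_cons, List.foldl_nil]
  split_ifs <;> omega

theorem pvSelect_snoc (gl : List (List (String × String))) (row : List (String × String)) :
    pvSelect (gl ++ [row])
      = if topicDepth (pvSelect gl) ≤ topicDepth row then row else pvSelect gl := by
  unfold pvSelect
  rw [List.reverse_append]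
  simp only [List.reverse_cons, List.reverse_nil, List.nil_append, List.singleton_append]
  rw [pvMax?_cons, pvFoldl_char]
  cases hmax : PySem.List.max? gl.reverse topicDepth with
  | none =>
      have : topicDepth ([] : List (String × String)) = 0 := by decide
      simp [Option.getD, this, pvTd_nonneg row]
  | some mm => simp only [Option.getD_some]; split_ifs <;> first | rfl | omega

theorem pvStep_comm (g : PySem.Dict String (List (List (String × String))))
    (row : List (String × String)) (hnd : g.keys.Nodup) :
    pvStepA (pvMapSel g) row = pvMapSel (pvStepB g row) := by
  unfold pvStepA pvStepB
  cases hid : PySem.Dict.get? (PySem.Dict.mk row) "id" with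
  | none => rfl
  | some eid =>
      simp only []
      rw [pvGet?_mapSel]
      unfold PySem.Dict.modify
      cases hg : g.get? eid with
      | none =>
          have hD : g.getD eid [] = [] := by unfold PySem.Dict.getD; rw [hg]; rfl
          rw [hD]
          simp only [Option.map_none, List.nil_append]
          rw [pvInsert_mapSel]
          rfl
      | some gl =>
          have hD : g.getD eid [] = gl := by unfold PySem.Dict.getD; rw [hg]; rfl
          rw [hD]
          simp only [Option.map_some]
          rw [pvInsert_mapSel, pvSelect_snoc]
          by_cases hle : topicDepth (pvSelect gl) ≤ topicDepth row
          · simp [hle]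
          · simp only [hle, if_false]
            refine (pvInsert_self _ _ _ ?_ ?_).symm
            · rw [pvKeys_mapSel]; exact hnd
            · rw [pvGet?_mapSel, hg]; rfl

theorem pvNodup_stepB (g : PySem.Dict String (List (List (String × String))))
    (row : List (String × String)) (hnd : g.keys.Nodup) : (pvStepB g row).keys.Nodup := by
  unfold pvStepB
  cases PySem.Dict.get? (PySem.Dict.mk row) "id" with
  | none => exact hnd
  | some eid => exact PySem.Dict.nodup_keys_insert _ _ _ hnd

theorem pvLoop_comm (rows : List (List (String × String)))
    (g : PySem.Dict String (List (List (String × String)))) (hnd : g.keys.Nodup) :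
    rows.foldl pvStepA (pvMapSel g) = pvMapSel (rows.foldl pvStepB g) := by
  induction rows generalizing g with
  | nil => rfl
  | cons r t ih =>
      simp only [List.foldl_cons]
      rw [pvStep_comm g r hnd]
      exact ih _ (pvNodup_stepB g r hnd)

theorem pvNodup_loop (rows : List (List (String × String)))
    (g : PySem.Dict String (List (List (String × String)))) (hnd : g.keys.Nodup) :
    (rows.foldl pvStepB g).keys.Nodup := by
  induction rows generalizing g with
  | nil => exact hnd
  | cons r t ih => exact ih _ (pvNodup_stepB g r hnd)

theorem pvSecond_pass (g : PySem.Dict String (List (List (String × String))))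
    (hnd : g.keys.Nodup) :
    (g.items.foldl (fun res p => res.insert p.1 (pvSelect p.2)) PySem.Dict.empty).items
      = (pvMapSel g).items := by
  rw [PySem.Dict.items_foldl_insert_fresh g.items (fun p => p.1) (fun p => pvSelect p.2)
        PySem.Dict.empty (by intro a _; simp [PySem.Dict.contains_empty]) (by exact hnd)]
  simp [pvMapSel, PySem.Dict.empty]

-- ===== VERDICT (by name: the statement is the Claim_ definition above) =====
theorem deduplicate_topics_spec : Claim_equal_deduplicate_topics := by
  intro rows _ _
  unfold Spec_deduplicate_topics deduplicate_topics deduplicate_topics_alt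
  have hnd0 : (PySem.Dict.empty : PySem.Dict String (List (List (String × String)))).keys.Nodup := by
    simp [PySem.Dict.keys, PySem.Dict.empty]
  show (rows.foldl pvStepA PySem.Dict.empty).items
      = (List.foldl (fun res p => res.insert p.1 (pvSelect p.2)) PySem.Dict.empty
          (rows.foldl pvStepB PySem.Dict.empty).items).items
  rw [pvSecond_pass _ (pvNodup_loop rows _ hnd0), ← pvLoop_comm rows _ hnd0]
  rfl
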